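-- pv_equiv track=rewrite | github.com/sanskrit-lexicon/PWG | pwgissues/issue81/linksort.py | option_5_helper
-- ===== SOURCE A (Python) =====
-- def option_5_helper(recs,lines):
--  # first, get metaline map
--  d = {}
--  for rec in recs:
--   (x,t,x0,meta) = rec
--   if meta not in d:
--    d[meta] = []
--   d[meta].append(rec)
--
--  newlines = []
--  metaline = None
--  for iline,line in enumerate(lines):
--   if line.startswith('<L>'):
--    metaline = line
--    imeta = iline
--    newlines.append(line)
--    continue
--   if line.startswith('<LEND>'):
--    metaline = None
--    if newlines[imeta].startswith('* '):
--     newline = '* ' + line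
--    else:
--     newline = line
--    newlines.append(newline)
--    continue
--   if metaline == None:
--    newlines.append(line)
--    continue
--   # a normal dataline.
--   # Search for matching recs
--   if metaline not in d:
--    newlines.append(line)
--    continue
--   recsmatch = d[metaline]
--   newline = line
--   for rec in recsmatch:
--    x,t,x0,meta = rec
--    newline = newline.replace(x,'** '+x)
--   newlines.append(newline)
--   # also mark metaline  * is for emacs org
--   oldmeta = newlines[imeta]
--   if oldmeta.startswith('* '):
--    pass # nothing to do
--   else:
--    newmeta = '* TODO ' + oldmeta
--    newlines[imeta] = newmeta
--  return newlines
-- ===== SOURCE B (Python) =====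
-- def option_5_helper(recs, lines):
--     # Segment-based rewrite: scan lines block by block (a block opens at '<L>' and
--     # ends at the next '<L>'/'<LEND>'), decide the block's marking once, then emit
--     # header, rewritten datalines and the closing '<LEND>' in one go.
--     d = {}
--     for rec in recs:
--         d.setdefault(rec[3], []).append(rec)
--     out = []
--     i = 0
--     n = len(lines)
--     last_marked = False  # whether the most recently emitted header got marked
--     while i < n:
--         line = lines[i]
--         if line.startswith('<L>'):
--             j = i + 1
--             while j < n and not lines[j].startswith('<L>') and not lines[j].startswith('<LEND>'):
--                 j += 1
--             body = lines[i + 1:j]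
--             recsmatch = d.get(line)
--             marked = recsmatch is not None and len(body) > 0
--             out.append('* TODO ' + line if marked else line)
--             last_marked = marked
--             if recsmatch is None:
--                 out.extend(body)
--             else:
--                 for dl in body:
--                     nl = dl
--                     for (x, t, x0, meta) in recsmatch:
--                         nl = nl.replace(x, '** ' + x)
--                     out.append(nl)
--             if j < n and lines[j].startswith('<LEND>'):
--                 out.append(('* ' if marked else '') + lines[j])
--                 j += 1
--             i = j
--         elif line.startswith('<LEND>'):
--             out.append(('* ' if last_marked else '') + line)
--             i += 1
--         else:
--             out.append(line)
--             i += 1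
--     return out
-- ===== Notes on version B (the rewrite author's own statement) =====
-- stated objective: alternative
-- what changed: Replaces A's line-by-line state machine (metaline/imeta registers with retroactive in-place marking of the already-emitted header) by a segment scan that consumes each <L>..<LEND> block at once, decides the block's marking up front from 'header in dict and body nonempty', and emits header, rewritten datalines and the closing line in one go.
import Mathlib
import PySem

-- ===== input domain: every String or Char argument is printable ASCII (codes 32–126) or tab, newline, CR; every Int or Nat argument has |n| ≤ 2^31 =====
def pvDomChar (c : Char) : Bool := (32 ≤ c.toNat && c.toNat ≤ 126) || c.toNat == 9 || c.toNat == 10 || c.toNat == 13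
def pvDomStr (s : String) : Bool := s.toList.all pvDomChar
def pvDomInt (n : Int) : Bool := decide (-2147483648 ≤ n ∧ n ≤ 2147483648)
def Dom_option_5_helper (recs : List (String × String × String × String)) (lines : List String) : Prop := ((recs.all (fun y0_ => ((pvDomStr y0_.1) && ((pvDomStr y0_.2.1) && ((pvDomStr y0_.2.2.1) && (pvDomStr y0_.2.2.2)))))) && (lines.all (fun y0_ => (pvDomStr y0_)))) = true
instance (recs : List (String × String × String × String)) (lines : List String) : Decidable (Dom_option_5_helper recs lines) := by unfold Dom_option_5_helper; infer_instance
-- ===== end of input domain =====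

-- B replaces A's line-by-line state machine (with retroactive in-place header marking)
-- by a block-at-a-time segment scan; same output, same asymptotic cost (objective: alternative).


-- ===== PORT A =====
-- d[meta].append(rec) preceded by 'if meta not in d: d[meta] = []'
def pvBuildA (recs : List (String × String × String × String)) :
    PySem.Dict String (List (String × String × String × String)) :=
  recs.foldl
    (fun d rec =>
      (if d.contains rec.2.2.2 then d else d.insert rec.2.2.2 []).modify rec.2.2.2 [] (· ++ [rec]))
    PySem.Dict.empty

-- the inner 'for rec in recsmatch: newline = newline.replace(x, "** " + x)'
def pvRepl (rm : List (String × String × String × String)) (line : String) : String :=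
  rm.foldl (fun nl r => PySem.Str.replace nl r.1 ("** " ++ r.1)) line

-- A's main loop: state = (newlines = acc, metaline, imeta); il is the enumerate index iline.
-- Where Python reads the unbound imeta (NameError, excluded by Pre_) the port leaves the line unchanged.
def pvALoop (d : PySem.Dict String (List (String × String × String × String))) :
    List String → List String → Option String → Option Nat → Nat → List String
  | [], acc, _, _, _ => acc
  | line :: rest, acc, metaline, imeta, il =>
    if PySem.Str.startswith line "<L>" then
      pvALoop d rest (acc ++ [line]) (some line) (some il) (il + 1)
    else if PySem.Str.startswith line "<LEND>" then
      let newline := match imeta with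
        | some i => if PySem.Str.startswith (acc.getD i "") "* " then "* " ++ line else line
        | none => line  -- Python raises NameError here; Pre_ excludes these inputs
      pvALoop d rest (acc ++ [newline]) none imeta (il + 1)
    else
      match metaline with
      | none => pvALoop d rest (acc ++ [line]) none imeta (il + 1)
      | some m =>
        match d.get? m with
        | none => pvALoop d rest (acc ++ [line]) metaline imeta (il + 1)
        | some recsmatch =>
          let acc2 := acc ++ [pvRepl recsmatch line]
          -- imeta is always bound when metaline is (they are assigned together); getD 0 is never the default here
          let i := imeta.getD 0
          let oldmeta := acc2.getD i ""
          let acc3 := if PySem.Str.startswith oldmeta "* " then acc2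
                      else acc2.set i ("* TODO " ++ oldmeta)
          pvALoop d rest acc3 metaline imeta (il + 1)

def option_5_helper (recs : List (String × String × String × String)) (lines : List String) : List String :=
  pvALoop (pvBuildA recs) lines [] none none 0

-- ===== PORT B =====
def pvBuildB (recs : List (String × String × String × String)) :
    PySem.Dict String (List (String × String × String × String)) :=
  recs.foldl
    (fun d rec => (d.setdefault rec.2.2.2 []).modify rec.2.2.2 [] (· ++ [rec]))
    PySem.Dict.empty

-- a line that neither opens nor closes a block (B's inner while condition)
def pvPlain (l : String) : Bool :=
  !(PySem.Str.startswith l "<L>") && !(PySem.Str.startswith l "<LEND>")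

-- B's while loop: one step per segment; lastMarked = whether the last emitted header was marked.
def pvBLoop (d : PySem.Dict String (List (String × String × String × String))) :
    List String → Bool → List String
  | [], _ => []
  | line :: rest, lastMarked =>
    if PySem.Str.startswith line "<L>" then
      let body := rest.takeWhile pvPlain
      let recsmatch := d.get? line
      let marked := recsmatch.isSome && !body.isEmpty
      let header := if marked then "* TODO " ++ line else line
      let datalines := match recsmatch with
        | none => body
        | some rm => body.map (pvRepl rm)
      match h : rest.dropWhile pvPlain with
      | lend :: rest' =>
        if PySem.Str.startswith lend "<LEND>" then
          header :: (datalines ++ ((if marked then "* " else "") ++ lend) :: pvBLoop d rest' marked)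
        else
          header :: (datalines ++ pvBLoop d (lend :: rest') marked)
      | [] => header :: datalines
    else if PySem.Str.startswith line "<LEND>" then
      ((if lastMarked then "* " else "") ++ line) :: pvBLoop d rest lastMarked
    else
      line :: pvBLoop d rest lastMarked
termination_by l _ => l.length
decreasing_by
  · have h1 : (rest.dropWhile pvPlain).length ≤ rest.length := rest.length_dropWhile_le pvPlain
    rw [h] at h1; simp at h1 ⊢; omega
  · have h1 : (rest.dropWhile pvPlain).length ≤ rest.length := rest.length_dropWhile_le pvPlain
    rw [h] at h1; simp at h1 ⊢; omega
  · simp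
  · simp

def option_5_helper_alt (recs : List (String × String × String × String)) (lines : List String) : List String :=
  pvBLoop (pvBuildB recs) lines false

-- ===== PRECONDITION & SPEC =====
-- Pre_ excludes exactly the inputs on which A raises NameError: a line starting with
-- '<LEND>' occurring before any line starting with '<L>' (imeta is still unbound there).
def Pre_option_5_helper (recs : List (String × String × String × String)) (lines : List String) : Prop :=
  ((lines.takeWhile (fun l => !(PySem.Str.startswith l "<L>"))).any
    (fun l => PySem.Str.startswith l "<LEND>")) = false
instance (recs : List (String × String × String × String)) (lines : List String) : Decidable (Pre_option_5_helper recs lines) := by unfold Pre_option_5_helper; infer_instance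

def pvWitness_option_5_helper : (List (String × String × String × String)) × List String :=
  ([("a", "t", "x0", "<L>1")], ["<L>1", "a b", "<LEND>"])

def Spec_option_5_helper (recs : List (String × String × String × String)) (lines : List String) (out : List String) : Prop := out = option_5_helper_alt recs lines
instance (recs : List (String × String × String × String)) (lines : List String) (out : List String) : Decidable (Spec_option_5_helper recs lines out) := by unfold Spec_option_5_helper; infer_instance

-- ===== CLAIM (what is proved, stated in full; the proofs are below) =====
def Claim_equal_option_5_helper : Prop := ∀ (recs : List (String × String × String × String)) (lines : List String), Dom_option_5_helper recs lines → Pre_option_5_helper recs lines → Spec_option_5_helper recs lines (option_5_helper recs lines)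

-- ===== LEMMAS AND PROOFS =====

-- the two dict builds agree (setdefault unfolds to A's explicit membership test)
lemma pvBuild_eq (recs : List (String × String × String × String)) : pvBuildA recs = pvBuildB recs := by
  unfold pvBuildA pvBuildB
  congr 1
  funext d rec
  by_cases hc : d.contains rec.2.2.2 = true
  · rw [PySem.Dict.setdefault_of_contains _ _ hc, if_pos hc]
  · rw [PySem.Dict.setdefault_of_not_contains _ _ (by simpa using hc), if_neg hc]

-- two string prefixes that are not prefixes of one another cannot both start the same string
lemma pvSW_disj (s p q : String) (h1 : ¬ (p.toList <+: q.toList)) (h2 : ¬ (q.toList <+: p.toList))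
    (h : PySem.Str.startswith s p = true) : PySem.Str.startswith s q = false := by
  rw [PySem.Str.startswith_eq] at h ⊢
  rw [PySem.Chars.startswith_iff] at h
  by_contra hq
  rw [Bool.not_eq_false, PySem.Chars.startswith_iff] at hq
  rcases List.prefix_or_prefix_of_prefix h hq with hc | hc
  · exact h1 hc
  · exact h2 hc

lemma pvSW_L_not_star (s : String) (h : PySem.Str.startswith s "<L>" = true) :
    PySem.Str.startswith s "* " = false :=
  pvSW_disj s _ _ (by decide) (by decide) h

lemma pvSW_LEND_not_L (s : String) (h : PySem.Str.startswith s "<LEND>" = true) :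
    PySem.Str.startswith s "<L>" = false :=
  pvSW_disj s _ _ (by decide) (by decide) h

lemma pvSW_todo_star (s : String) : PySem.Str.startswith ("* TODO " ++ s) "* " = true := by
  rw [PySem.Str.startswith_eq, PySem.Chars.startswith_iff, String.toList_append]
  have h7 : "* TODO ".toList = ['*', ' ', 'T', 'O', 'D', 'O', ' '] := by decide
  rw [h7]
  exact ⟨['T','O','D','O',' '] ++ s.toList, by simp⟩

-- getD / set through appends
lemma pvGetD_append_left (l l' : List String) (i : Nat) (h : i < l.length) (d : String) :
    (l ++ l').getD i d = l.getD i d := by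
  simp [List.getD, List.getElem?_append_left h]

lemma pvGetD_append_len (l : List String) (x : String) (l' : List String) (d : String) :
    (l ++ x :: l').getD l.length d = x := by
  simp [List.getD, List.getElem?_append_right (le_refl _)]

lemma pvHead_dropWhile (p : String → Bool) (l : List String) (x : String) (xs : List String)
    (h : l.dropWhile p = x :: xs) : p x = false := by
  have h2 : l.dropWhile p ≠ [] := by simp [h]
  have h3 := List.head_dropWhile_not p h2
  simp only [h] at h3
  simpa using h3

-- the flag B carries = whether the header A's imeta points at is marked
def pvFlag (acc : List String) : Option Nat → Bool
  | none => false
  | some i => PySem.Str.startswith (acc.getD i "") "* "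

-- A consumes a block's body with a header not in d: lines appended verbatim
lemma pvBlockNone (d : PySem.Dict String (List (String × String × String × String)))
    (h : String) (hd : d.get? h = none) :
    ∀ (body rest acc : List String) (i : Nat) (il : Nat),
      (∀ l ∈ body, pvPlain l = true) →
      pvALoop d (body ++ rest) acc (some h) (some i) il
        = pvALoop d rest (acc ++ body) (some h) (some i) (il + body.length) := by
  intro body
  induction body with
  | nil => intro rest acc i il _; simp
  | cons b bt ih =>
    intro rest acc i il hb
    have hplain : pvPlain b = true := hb b (by simp)
    have hbL : PySem.Str.startswith b "<L>" = false := by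
      simp [pvPlain] at hplain; exact hplain.1
    have hbE : PySem.Str.startswith b "<LEND>" = false := by
      simp [pvPlain] at hplain; exact hplain.2
    have ht : ∀ l ∈ bt, pvPlain l = true := fun l hl => hb l (by simp [hl])
    simp only [List.cons_append, pvALoop, hbL, hbE, hd, Bool.false_eq_true, if_false]
    rw [ih rest (acc ++ [b]) i (il + 1) ht]
    simp only [List.append_assoc, List.singleton_append, List.length_cons]
    ring_nf

-- A consumes a block's body once the header is already marked: datalines rewritten, header untouched
lemma pvBlockMarked (d : PySem.Dict String (List (String × String × String × String)))
    (h : String) (rm : List (String × String × String × String)) (hd : d.get? h = some rm) :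
    ∀ (body rest acc : List String) (i : Nat) (il : Nat),
      (∀ l ∈ body, pvPlain l = true) →
      i < acc.length →
      PySem.Str.startswith (acc.getD i "") "* " = true →
      pvALoop d (body ++ rest) acc (some h) (some i) il
        = pvALoop d rest (acc ++ body.map (pvRepl rm)) (some h) (some i) (il + body.length) := by
  intro body
  induction body with
  | nil => intro rest acc i il _ _ _; simp
  | cons b bt ih =>
    intro rest acc i il hb hi hsw
    have hplain : pvPlain b = true := hb b (by simp)
    have hbL : PySem.Str.startswith b "<L>" = false := by
      simp [pvPlain] at hplain; exact hplain.1
    have hbE : PySem.Str.startswith b "<LEND>" = false := by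
      simp [pvPlain] at hplain; exact hplain.2
    have ht : ∀ l ∈ bt, pvPlain l = true := fun l hl => hb l (by simp [hl])
    have hget : (acc ++ [pvRepl rm b]).getD i "" = acc.getD i "" := pvGetD_append_left _ _ i hi _
    simp only [List.cons_append, pvALoop, hbL, hbE, hd, Bool.false_eq_true, if_false,
      Option.getD_some, hget, hsw, if_true]
    rw [ih rest (acc ++ [pvRepl rm b]) i (il + 1) ht (by simp only [List.length_append, List.length_cons, List.length_nil, List.length_map]; omega) (by rw [hget]; exact hsw)]
    simp only [List.append_assoc, List.singleton_append, List.map_cons, List.length_cons]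
    ring_nf

-- B's continuation after a block: [] at end of input, the '<LEND>' step, or the next '<L>' header
def pvBCont (d : PySem.Dict String (List (String × String × String × String))) :
    List String → Bool → List String
  | [], _ => []
  | x :: xs, m =>
    if PySem.Str.startswith x "<LEND>" then ((if m then "* " else "") ++ x) :: pvBLoop d xs m
    else pvBLoop d (x :: xs) m

-- the simulation invariant: either between blocks with a consistent flag, or at a fresh header
def pvH (ls acc : List String) (metaOpt : Option String) (st : Option Nat) (flag : Bool) : Prop :=
  (metaOpt = none ∧ flag = pvFlag acc st ∧ (∀ i, st = some i → i < acc.length)) ∨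
  (∃ l r0, ls = l :: r0 ∧ PySem.Str.startswith l "<L>" = true)

-- A's loop after a completed block body = the emitted block ++ B's continuation
lemma pvCont (d : PySem.Dict String (List (String × String × String × String))) (n : Nat)
    (ih : ∀ (ls acc : List String) (mo : Option String) (st : Option Nat) (flag : Bool),
      ls.length ≤ n → pvH ls acc mo st flag →
      pvALoop d ls acc mo st acc.length = acc ++ pvBLoop d ls flag)
    (line : String) (acc out rest' : List String) (m : Bool) (il : Nat)
    (hne : out ≠ [])
    (hflag : PySem.Str.startswith ((acc ++ out).getD acc.length "") "* " = m)
    (hx : ∀ x xs, rest' = x :: xs → pvPlain x = false)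
    (hlen : rest'.length ≤ n)
    (hil : il = (acc ++ out).length) :
    pvALoop d rest' (acc ++ out) (some line) (some acc.length) il
      = (acc ++ out) ++ pvBCont d rest' m := by
  subst hil
  cases rest' with
  | nil => simp [pvALoop, pvBCont]
  | cons x xs =>
    have hpx : pvPlain x = false := hx x xs rfl
    have hlt : acc.length < (acc ++ out).length := by
      cases out with
      | nil => exact absurd rfl hne
      | cons a b => simp
    have hxs : xs.length ≤ n := by simp at hlen; omega
    cases hEx : PySem.Str.startswith x "<LEND>" with
    | true =>
      have hLx : PySem.Str.startswith x "<L>" = false := pvSW_LEND_not_L x hEx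
      simp only [pvALoop, hLx, Bool.false_eq_true, if_false, hEx, if_true, hflag]
      have hif : (if m = true then "* " ++ x else x) = (if m = true then "* " else "") ++ x := by
        cases m <;> simp [String.empty_append]
      rw [hif]
      have hfl : pvFlag ((acc ++ out) ++ [(if m then "* " else "") ++ x]) (some acc.length) = m := by
        simp only [pvFlag]
        rw [pvGetD_append_left _ _ _ hlt, hflag]
      have hl2 : (acc ++ out).length + 1 = ((acc ++ out) ++ [(if m then "* " else "") ++ x]).length := by
        simp only [List.length_append, List.length_cons, List.length_nil]
      have hrec := ih xs ((acc ++ out) ++ [(if m then "* " else "") ++ x]) none (some acc.length) m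
        hxs (Or.inl ⟨rfl, hfl.symm, by intro i hi; cases hi; simp only [List.length_append, List.length_cons, List.length_nil, List.length_map]; omega⟩)
      simp only [pvBCont, hEx, if_true]
      rw [hl2, hrec]
      simp
    | false =>
      have hLx : PySem.Str.startswith x "<L>" = true := by
        cases hc : PySem.Str.startswith x "<L>" with
        | true => rfl
        | false =>
          exfalso
          unfold pvPlain at hpx
          rw [hc, hEx] at hpx
          simp at hpx
      have hrec := ih (x :: xs) (acc ++ out) (some line) (some acc.length) m hlen
        (Or.inr ⟨x, xs, rfl, hLx⟩)
      rw [hrec]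
      simp only [pvBCont]
      rw [hEx]
      simp

-- main simulation: A's loop from a between-blocks state = acc ++ B's loop with the matching flag
lemma pvMain (d : PySem.Dict String (List (String × String × String × String))) :
    ∀ (n : Nat) (ls acc : List String) (metaOpt : Option String) (st : Option Nat) (flag : Bool),
      ls.length ≤ n → pvH ls acc metaOpt st flag →
      pvALoop d ls acc metaOpt st acc.length = acc ++ pvBLoop d ls flag := by
  intro n
  induction n with
  | zero =>
    intro ls acc mo st flag hlen _
    have : ls = [] := List.eq_nil_of_length_eq_zero (Nat.le_zero.mp hlen)
    subst this
    simp [pvALoop, pvBLoop]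
  | succ n ih =>
    intro ls acc mo st flag hlen hH
    cases ls with
    | nil => simp [pvALoop, pvBLoop]
    | cons line rest =>
      have hrn : rest.length ≤ n := by simp at hlen; omega
      by_cases hL : PySem.Str.startswith line "<L>" = true
      · -- header: consume the whole block
        have hsplit := List.takeWhile_append_dropWhile (p := pvPlain) (l := rest)
        have hbody : ∀ l ∈ rest.takeWhile pvPlain, pvPlain l = true :=
          fun l hl => List.mem_takeWhile_imp hl
        have hx : ∀ x xs, rest.dropWhile pvPlain = x :: xs → pvPlain x = false :=
          fun x xs hh => pvHead_dropWhile pvPlain rest x xs hh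
        have hdlen : (rest.dropWhile pvPlain).length ≤ n :=
          le_trans (rest.length_dropWhile_le pvPlain) hrn
        have hstar : PySem.Str.startswith line "* " = false := pvSW_L_not_star line hL
        -- A's first step
        simp only [pvALoop, hL, if_true]
        -- B's first step
        rw [pvBLoop]
        simp only [hL, if_true]
        cases hm : d.get? line with
        | none =>
          -- block with unknown header: everything verbatim, marked = false
          have hA : pvALoop d rest (acc ++ [line]) (some line) (some acc.length) (acc.length + 1)
              = acc ++ (line :: rest.takeWhile pvPlain) ++ pvBCont d (rest.dropWhile pvPlain) false := by
            conv_lhs => rw [← hsplit]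
            rw [pvBlockNone d line hm _ _ _ _ _ hbody]
            have : (acc ++ [line]) ++ rest.takeWhile pvPlain = acc ++ (line :: rest.takeWhile pvPlain) := by simp
            rw [this]
            exact pvCont d n ih line acc (line :: rest.takeWhile pvPlain) _ false _
              (by simp) (by rw [pvGetD_append_len, hstar]) hx hdlen (by simp only [List.length_append, List.length_cons, List.length_nil, List.length_map]; omega)
          rw [hA]
          simp only [hm]
          split
          next lend r2 heq =>
            rw [heq] at hA ⊢
            simp only [pvBCont]
            split <;> simp
          next heq =>
            rw [heq]
            simp only [pvBCont]
            simp
        | some rm =>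
          cases hbt : rest.takeWhile pvPlain with
          | nil =>
            -- known header but empty body: nothing marked
            have hrw : rest = rest.dropWhile pvPlain := by
              conv_lhs => rw [← hsplit]
              rw [hbt]; rfl
            have hA : pvALoop d rest (acc ++ [line]) (some line) (some acc.length) (acc.length + 1)
                = acc ++ [line] ++ pvBCont d (rest.dropWhile pvPlain) false := by
              conv_lhs => rw [hrw]
              exact pvCont d n ih line acc [line] _ false _
                (by simp) (by rw [pvGetD_append_len, hstar]) hx hdlen (by simp)
            rw [hA]
            simp only [hm, hbt]
            split
            next lend r2 heq =>
              rw [heq]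
              unfold pvBCont
              simp only [pvBCont]
              split <;> simp
            next heq =>
              rw [heq]
              simp only [pvBCont]
              simp
          | cons b bt =>
            -- known header with a body: the first dataline marks the header
            have hbplain : pvPlain b = true := hbody b (by rw [hbt]; simp)
            have hbL : PySem.Str.startswith b "<L>" = false := by
              simp [pvPlain] at hbplain; exact hbplain.1
            have hbE : PySem.Str.startswith b "<LEND>" = false := by
              simp [pvPlain] at hbplain; exact hbplain.2
            have htb : ∀ l ∈ bt, pvPlain l = true := by
              intro l hl
              exact hbody l (by rw [hbt]; simp [hl])
            have hrw : rest = b :: (bt ++ rest.dropWhile pvPlain) := by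
              conv_lhs => rw [← hsplit, hbt]
              simp
            have hA : pvALoop d rest (acc ++ [line]) (some line) (some acc.length) (acc.length + 1)
                = acc ++ (("* TODO " ++ line) :: (b :: bt).map (pvRepl rm))
                    ++ pvBCont d (rest.dropWhile pvPlain) true := by
              conv_lhs => rw [hrw]
              -- the first dataline's step
              simp only [pvALoop, hbL, hbE, Bool.false_eq_true, if_false, hm, Option.getD_some]
              have e1 : (acc ++ [line]) ++ [pvRepl rm b] = acc ++ line :: [pvRepl rm b] := by simp
              rw [e1, pvGetD_append_len, hstar]
              simp only [Bool.false_eq_true, if_false]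
              rw [List.set_append_right _ _ (le_refl _), Nat.sub_self]
              simp only [List.set_cons_zero]
              have e2 : acc ++ ("* TODO " ++ line) :: [pvRepl rm b]
                  = (acc ++ ["* TODO " ++ line, pvRepl rm b]) := by simp
              rw [e2]
              rw [pvBlockMarked d line rm hm bt _ _ acc.length _ htb (by simp)
                (by rw [pvGetD_append_len]; exact pvSW_todo_star line)]
              have e3 : (acc ++ ["* TODO " ++ line, pvRepl rm b]) ++ bt.map (pvRepl rm)
                  = acc ++ (("* TODO " ++ line) :: (b :: bt).map (pvRepl rm)) := by simp
              rw [e3]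
              exact pvCont d n ih line acc (("* TODO " ++ line) :: (b :: bt).map (pvRepl rm)) _ true _
                (by simp) (by rw [pvGetD_append_len]; exact pvSW_todo_star line) hx hdlen
                (by simp only [List.length_append, List.length_cons, List.length_nil, List.length_map]; omega)
            rw [hA]
            simp only [hm, hbt]
            split
            next lend r2 heq =>
              rw [heq]
              unfold pvBCont
              simp only [pvBCont]
              split <;> simp
            next heq =>
              rw [heq]
              simp only [pvBCont]
              simp
      · -- not a header: H must be the between-blocks case
        rcases hH with ⟨hmo, hfl, hst⟩ | ⟨l, r0, heq, hswl⟩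
        · subst hmo
          by_cases hE : PySem.Str.startswith line "<LEND>" = true
          · -- '<LEND>' line
            simp only [pvALoop, hL, Bool.false_eq_true, if_false, hE, if_true]
            rw [pvBLoop]
            simp only [hL, Bool.false_eq_true, if_false, hE, if_true]
            cases st with
            | none =>
              simp only []
              have hfl0 : flag = false := by simpa [pvFlag] using hfl
              subst hfl0
              have hrec := ih rest (acc ++ [line]) none none false hrn
                (Or.inl ⟨rfl, rfl, by intro i hi; cases hi⟩)
              have hl2 : acc.length + 1 = (acc ++ [line]).length := by simp
              rw [hl2, hrec]
              simp [String.empty_append]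
            | some i =>
              have hilt : i < acc.length := hst i rfl
              have hfl1 : flag = PySem.Str.startswith (acc.getD i "") "* " := by
                simpa [pvFlag] using hfl
              have hnl : (if PySem.Str.startswith (acc.getD i "") "* " then "* " ++ line else line)
                  = (if flag then "* " else "") ++ line := by
                rw [hfl1]
                cases hb : PySem.Str.startswith (acc.getD i "") "* " <;> simp [String.empty_append]
              simp only [hnl]
              have hfl2 : pvFlag (acc ++ [(if flag then "* " else "") ++ line]) (some i) = flag := by
                simp only [pvFlag]
                rw [pvGetD_append_left _ _ _ hilt, ← hfl1]
              have hrec := ih rest (acc ++ [(if flag then "* " else "") ++ line]) none (some i) flag hrn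
                (Or.inl ⟨rfl, hfl2.symm, by intro j hj; cases hj; simp only [List.length_append, List.length_cons, List.length_nil, List.length_map]; omega⟩)
              have hl2 : acc.length + 1 = (acc ++ [(if flag then "* " else "") ++ line]).length := by simp
              rw [hl2, hrec]
              simp
          · -- ordinary line outside any block
            simp only [pvALoop, hL, Bool.false_eq_true, if_false, hE]
            rw [pvBLoop]
            simp only [hL, Bool.false_eq_true, if_false, hE]
            have hfl2 : pvFlag (acc ++ [line]) st = flag := by
              cases st with
              | none => simpa [pvFlag] using hfl.symm
              | some i =>
                simp only [pvFlag]
                rw [pvGetD_append_left _ _ _ (hst i rfl)]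
                simpa [pvFlag] using hfl.symm
            have hrec := ih rest (acc ++ [line]) none st flag hrn
              (Or.inl ⟨rfl, hfl2.symm, by
                intro j hj; cases hj
                have := hst _ rfl
                simp only [List.length_append, List.length_cons, List.length_nil]; omega⟩)
            have hl2 : acc.length + 1 = (acc ++ [line]).length := by simp
            rw [hl2, hrec]
            simp
        · cases heq
          exact absurd hswl hL

-- ===== VERDICT (by name: the statement is the Claim_ definition above) =====
theorem option_5_helper_spec : Claim_equal_option_5_helper := by
  intro recs lines _ _
  unfold Spec_option_5_helper option_5_helper option_5_helper_alt
  rw [pvBuild_eq]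
  have := pvMain (pvBuildB recs) lines.length lines [] none none false le_rfl
    (Or.inl ⟨rfl, rfl, by intro i hi; cases hi⟩)
  simpa using this
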